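-- pv_equiv track=rewrite | github.com/TruongVanChung2411/CTDL | Baitap buoi 4/Bai5/bai5_15.py | find_next_greater_smaller
-- ===== SOURCE A (Python) =====
-- def find_next_greater_smaller(arr):
--     n = len(arr)
--     nge = [-1] * n  # Lưu phần tử lớn hơn tiếp theo
--     stack = []
--
--     # Tìm Next Greater Element (NGE) cho mỗi phần tử
--     for i in range(n):
--         while stack and arr[stack[-1]] < arr[i]:
--             idx = stack.pop()
--             nge[idx] = arr[i]
--         stack.append(i)
--
--     # Tìm Next Smaller Element (NSE) cho NGE
--     result = []
--     for i in range(n):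
--         if nge[i] == -1:
--             result.append(-1)
--         else:
--             # Tìm phần tử nhỏ hơn đầu tiên sau NGE
--             j = i + 1
--             found = -1
--             while j < n:
--                 if arr[j] < nge[i]:
--                     found = arr[j]
--                     break
--                 j += 1
--             result.append(found)
--
--     return result
-- ===== SOURCE B (Python) =====
-- def _nge_idx(a):
--     # index of the first element to the right that is strictly greater, -1 if none (monotonic stack)
--     n = len(a)
--     res = [-1] * n
--     st = []
--     for i in range(n):
--         while st and a[st[-1]] < a[i]:
--             res[st.pop()] = i
--         st.append(i)
--     return res
--
-- def find_next_greater_smaller(arr):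
--     n = len(arr)
--     g = _nge_idx(arr)                       # p = position of the next greater element
--     s = _nge_idx([-x for x in arr])         # position of the next strictly smaller element
--     out = []
--     for i in range(n):
--         p = g[i]
--         if p == -1:
--             out.append(-1)
--         elif p > i + 1:
--             # everything strictly between i and p is <= arr[i] < arr[p]
--             out.append(arr[i + 1])
--         else:
--             q = s[p]
--             out.append(arr[q] if q != -1 else -1)
--     return out
-- ===== Notes on version B (the rewrite author's own statement) =====
-- stated objective: alternative
-- what changed: A's second pass (for each element, a fresh linear scan for the first value below its next-greater value) is replaced by two monotonic-stack passes (next-greater index, next-smaller index on the negated array) combined by the observation that everything strictly between i and its next-greater position p is <= arr[i], so the answer is arr[i+1] when p > i+1 and next-smaller(p) when p = i+1.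
-- intended difference: On arrays where some element's next greater value is exactly -1 (and a value below -1 follows, or the next-greater is not adjacent), A's sentinel -1 collides with that real value so A returns -1 there as if no next-greater existed, while B returns the intended first smaller value after it. — e.g. on find_next_greater_smaller([-2, -1, -5]): A returns [-1, -1, -1], B returns [-5, -1, -1]
import Mathlib
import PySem

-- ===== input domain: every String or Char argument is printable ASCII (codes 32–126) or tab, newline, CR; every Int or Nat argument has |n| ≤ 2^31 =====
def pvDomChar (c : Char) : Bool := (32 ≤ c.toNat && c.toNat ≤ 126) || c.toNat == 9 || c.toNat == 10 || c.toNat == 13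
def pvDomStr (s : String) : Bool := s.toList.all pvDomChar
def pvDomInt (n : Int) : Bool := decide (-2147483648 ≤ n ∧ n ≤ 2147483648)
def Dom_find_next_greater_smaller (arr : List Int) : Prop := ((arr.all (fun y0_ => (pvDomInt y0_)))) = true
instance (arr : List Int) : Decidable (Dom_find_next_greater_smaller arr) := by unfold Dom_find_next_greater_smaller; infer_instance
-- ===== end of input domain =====

-- B replaces A's per-element search pass by two monotonic-stack passes plus a constant-time combination
-- (alternative algorithm); A's -1 sentinel collides with a real next-greater value of -1, stated as D_.


-- ===== PORT A =====
-- the interior while-loop of A's first pass (stack top at list head; stores the VALUE arr[i])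
def pvPopA (arr : List Int) (v : Int) (nge : List Int) (st : List Nat) : List Int × List Nat :=
  match st with
  | [] => (nge, [])
  | t :: r => if arr.getD t 0 < v then pvPopA arr v (nge.set t v) r else (nge, t :: r)

-- A's interior search loop: first value at index ≥ j that is < t, else -1
def pvSearchA (arr : List Int) (t : Int) (j : Nat) : Int :=
  if j < arr.length then
    if arr.getD j 0 < t then arr.getD j 0 else pvSearchA arr t (j+1)
  else -1
  termination_by arr.length - j

def find_next_greater_smaller (arr : List Int) : List Int :=
  let n := arr.length
  let nge := ((List.range n).foldl (fun s i =>
      let p := pvPopA arr (arr.getD i 0) s.1 s.2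
      (p.1, i :: p.2)) (List.replicate n (-1), ([] : List Nat))).1
  (List.range n).map (fun i =>
    if nge.getD i 0 = -1 then (-1 : Int) else pvSearchA arr (nge.getD i 0) (i+1))

-- ===== PORT B =====
-- B's helper _nge_idx: same stack discipline but stores the INDEX i
def pvPopB (a : List Int) (v : Int) (i : Nat) (res : List Int) (st : List Nat) : List Int × List Nat :=
  match st with
  | [] => (res, [])
  | t :: r => if a.getD t 0 < v then pvPopB a v i (res.set t (i : Int)) r else (res, t :: r)

def pvNgeIdx (a : List Int) : List Int :=
  ((List.range a.length).foldl (fun s i =>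
      let p := pvPopB a (a.getD i 0) i s.1 s.2
      (p.1, i :: p.2)) (List.replicate a.length (-1), ([] : List Nat))).1

def find_next_greater_smaller_alt (arr : List Int) : List Int :=
  let n := arr.length
  let g := pvNgeIdx arr
  let s := pvNgeIdx (arr.map (fun x => -x))
  (List.range n).map (fun i =>
    let p := g.getD i 0
    if p = -1 then (-1 : Int)
    else if (i : Int) + 1 < p then arr.getD (i+1) 0
    else
      let q := s.getD p.toNat 0
      if q ≠ -1 then arr.getD q.toNat 0 else -1)

-- ===== PRECONDITION & SPEC =====
-- On arrays where some element's next greater value is exactly -1 (and a value below -1 follows, or the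
-- next-greater is not adjacent), A's sentinel -1 collides with that real value so A returns -1 there as if
-- no next-greater existed, while B returns the intended first smaller value after it.
def D_find_next_greater_smaller (arr : List Int) : Prop :=
  ∃ i < arr.length, ∃ p < arr.length, i < p ∧ arr.getD p 0 = -1 ∧ arr.getD i 0 < arr.getD p 0 ∧
    (∀ k < p, i < k → arr.getD k 0 ≤ arr.getD i 0) ∧
    (i + 1 < p ∨ ∃ j < arr.length, p < j ∧ arr.getD j 0 < -1)
instance (arr : List Int) : Decidable (D_find_next_greater_smaller arr) := by
  unfold D_find_next_greater_smaller; infer_instance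

def Spec_find_next_greater_smaller (arr : List Int) (out : List Int) : Prop :=
  ¬ D_find_next_greater_smaller arr → out = find_next_greater_smaller_alt arr
instance (arr : List Int) (out : List Int) : Decidable (Spec_find_next_greater_smaller arr out) := by
  unfold Spec_find_next_greater_smaller; infer_instance

def pvDiffWitness_find_next_greater_smaller : List Int := [-2, -1, -5]
def pvDiffWitnessOut_find_next_greater_smaller : (List Int) × (List Int) := ([-1, -1, -1], [-5, -1, -1])

-- ===== CLAIM (what is proved, stated in full; the proofs are below) =====
def Claim_unchanged_find_next_greater_smaller : Prop := ∀ (arr : List Int), Dom_find_next_greater_smaller arr → Spec_find_next_greater_smaller arr (find_next_greater_smaller arr)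
def Claim_changed_find_next_greater_smaller : Prop := Dom_find_next_greater_smaller (pvDiffWitness_find_next_greater_smaller) ∧ D_find_next_greater_smaller (pvDiffWitness_find_next_greater_smaller) ∧ find_next_greater_smaller (pvDiffWitness_find_next_greater_smaller) = pvDiffWitnessOut_find_next_greater_smaller.1 ∧ find_next_greater_smaller_alt (pvDiffWitness_find_next_greater_smaller) = pvDiffWitnessOut_find_next_greater_smaller.2 ∧ pvDiffWitnessOut_find_next_greater_smaller.1 ≠ pvDiffWitnessOut_find_next_greater_smaller.2
def Claim_exact_find_next_greater_smaller : Prop := ∀ (arr : List Int), Dom_find_next_greater_smaller arr → D_find_next_greater_smaller arr → find_next_greater_smaller arr ≠ find_next_greater_smaller_alt arr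

-- ===== LEMMAS AND PROOFS =====

-- first index k with j ≤ k < m and q (a[k]), else none
def pvFirst (a : List Int) (q : Int → Bool) (j m : Nat) : Option Nat :=
  if j < m then
    if q (a.getD j 0) then some j else pvFirst a q (j+1) m
  else none
  termination_by m - j

-- generic stack pass storing (f i)
def gPop (a : List Int) (v w : Int) (res : List Int) (st : List Nat) : List Int × List Nat :=
  match st with
  | [] => (res, [])
  | t :: r => if a.getD t 0 < v then gPop a v w (res.set t w) r else (res, t :: r)

def gStep (a : List Int) (f : Nat → Int) (s : List Int × List Nat) (i : Nat) : List Int × List Nat :=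
  let p := gPop a (a.getD i 0) (f i) s.1 s.2
  (p.1, i :: p.2)

def gIter (a : List Int) (f : Nat → Int) (m : Nat) : List Int × List Nat :=
  (List.range m).foldl (gStep a f) (List.replicate a.length (-1), [])

def pvUnres (a : List Int) (m j : Nat) : Prop :=
  ∀ k, j < k → k < m → a.getD k 0 ≤ a.getD j 0

-- the loop invariant
def pvInv (a : List Int) (f : Nat → Int) (m : Nat) (s : List Int × List Nat) : Prop :=
  (∀ t ∈ s.2, t < m ∧ pvUnres a m t) ∧
  (∀ j, j < m → j ∉ s.2 → (pvFirst a (fun y => a.getD j 0 < y) (j+1) m).isSome) ∧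
  List.Pairwise (fun x y => y < x) s.2 ∧
  s.1.length = a.length ∧
  (∀ j, j < a.length →
    s.1.getD j 0 = match pvFirst a (fun y => a.getD j 0 < y) (j+1) m with
                   | some p => f p | none => -1)

theorem pvFirst_none_intro (a : List Int) (q : Int → Bool) (j m : Nat)
    (h : ∀ k, j ≤ k → k < m → ¬ q (a.getD k 0)) : pvFirst a q j m = none := by
  rw [pvFirst]
  split
  · next hjm =>
    rw [if_neg (h j le_rfl hjm)]
    exact pvFirst_none_intro a q (j+1) m (fun k hk1 hk2 => h k (by omega) hk2)
  · rfl
  termination_by m - j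

theorem pvFirst_some_intro (a : List Int) (q : Int → Bool) (j m p : Nat)
    (h1 : j ≤ p) (h2 : p < m) (h3 : q (a.getD p 0))
    (h4 : ∀ k, j ≤ k → k < p → ¬ q (a.getD k 0)) : pvFirst a q j m = some p := by
  rw [pvFirst]
  rw [if_pos (by omega)]
  by_cases hjp : j = p
  · subst hjp; rw [if_pos h3]
  · rw [if_neg (h4 j le_rfl (by omega))]
    exact pvFirst_some_intro a q (j+1) m p (by omega) h2 h3 (fun k hk1 hk2 => h4 k (by omega) hk2)
  termination_by m - j

theorem pvFirst_some_elim (a : List Int) (q : Int → Bool) (j m p : Nat)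
    (h : pvFirst a q j m = some p) :
    j ≤ p ∧ p < m ∧ q (a.getD p 0) ∧ ∀ k, j ≤ k → k < p → ¬ q (a.getD k 0) := by
  rw [pvFirst] at h
  split at h
  · next hjm =>
    split at h
    · next hq =>
      obtain rfl : j = p := by exact Option.some.inj h
      exact ⟨le_rfl, hjm, hq, fun k hk1 hk2 => absurd hk2 (by omega)⟩
    · next hq =>
      obtain ⟨h1, h2, h3, h4⟩ := pvFirst_some_elim a q (j+1) m p h
      refine ⟨by omega, h2, h3, fun k hk1 hk2 => ?_⟩
      rcases Nat.eq_or_lt_of_le hk1 with rfl | hk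
      · exact hq
      · exact h4 k (by omega) hk2
  · exact absurd h (by simp)
  termination_by m - j

theorem pvFirst_isSome (a : List Int) (q : Int → Bool) (j m k : Nat)
    (h1 : j ≤ k) (h2 : k < m) (h3 : q (a.getD k 0)) : (pvFirst a q j m).isSome := by
  rw [pvFirst]
  rw [if_pos (by omega)]
  split
  · rfl
  · next hq =>
    have hjk : j ≠ k := fun h => hq (h ▸ h3)
    exact pvFirst_isSome a q (j+1) m k (by omega) h2 h3
  termination_by m - j

theorem pvFirst_succ (a : List Int) (q : Int → Bool) (j m : Nat) :
    pvFirst a q j (m+1) = match pvFirst a q j m with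
      | some p => some p
      | none => if j ≤ m then (if q (a.getD m 0) then some m else none) else none := by
  rcases Nat.lt_or_ge j m with hjm | hjm
  · conv_lhs => rw [pvFirst]
    conv_rhs => rw [pvFirst]
    rw [if_pos (show j < m + 1 by omega), if_pos hjm]
    split
    · rfl
    · rw [pvFirst_succ a q (j+1) m]
      cases hx : pvFirst a q (j+1) m <;>
        simp [show j+1 ≤ m by omega, show j ≤ m by omega]
  · by_cases hje : j = m
    · have hmm : pvFirst a q j m = none := by rw [pvFirst]; rw [if_neg (by omega)]
      have h2 : pvFirst a q (j+1) (m+1) = none := by rw [pvFirst]; rw [if_neg (by omega)]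
      conv_lhs => rw [pvFirst]
      rw [if_pos (by omega), hmm, h2, hje]
      simp
    · have h1 : pvFirst a q j (m+1) = none := by rw [pvFirst]; rw [if_neg (by omega)]
      have h2 : pvFirst a q j m = none := by rw [pvFirst]; rw [if_neg (by omega)]
      rw [h1, h2]
      simp [show ¬ j ≤ m by omega]
  termination_by m - j

theorem map_neg_getD (arr : List Int) (k : Nat) :
    (arr.map (fun x => -x)).getD k 0 = -(arr.getD k 0) := by
  rcases Nat.lt_or_ge k arr.length with hk | hk
  · simp [List.getD_eq_getElem?_getD, List.getElem?_map, List.getElem?_eq_getElem hk]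
  · rw [List.getD_eq_default _ _ (by simpa using hk), List.getD_eq_default _ _ hk]
    simp

theorem pvFirst_neg (a : List Int) (q : Int → Bool) (j m : Nat) :
    pvFirst (a.map (fun x => -x)) q j m = pvFirst a (fun y => q (-y)) j m := by
  conv_lhs => rw [pvFirst]
  conv_rhs => rw [pvFirst]
  rw [map_neg_getD]
  split
  · split
    · rfl
    · exact pvFirst_neg a q (j+1) m
  · rfl
  termination_by m - j

theorem gPop_spec (a : List Int) (v w : Int) (m : Nat) :
    ∀ (st : List Nat) (res : List Int),
    (∀ t ∈ st, t < m ∧ pvUnres a m t) →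
    List.Pairwise (fun x y => y < x) st →
    (∀ t ∈ st, t < res.length) →
    (∀ t ∈ (gPop a v w res st).2, t ∈ st ∧ ¬ a.getD t 0 < v) ∧
    (∀ t ∈ st, ¬ a.getD t 0 < v → t ∈ (gPop a v w res st).2) ∧
    List.Pairwise (fun x y => y < x) (gPop a v w res st).2 ∧
    (gPop a v w res st).1.length = res.length ∧
    (∀ j, (gPop a v w res st).1.getD j 0 =
      if j ∈ st ∧ a.getD j 0 < v then w else res.getD j 0) := by
  intro st
  induction st with
  | nil =>
    intro res _ _ _
    refine ⟨by simp [gPop], by simp, by simp [gPop], by simp [gPop], ?_⟩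
    intro j; simp [gPop]
  | cons t r ih =>
    intro res h1 hpair hlen
    by_cases hlt : a.getD t 0 < v
    · have hres : gPop a v w res (t :: r) = gPop a v w (res.set t w) r := by
        rw [gPop]; rw [if_pos hlt]
      have htr : ∀ t' ∈ r, t' < t := by
        intro t' ht'; exact (List.pairwise_cons.mp hpair).1 t' ht'
      obtain ⟨C1, C2, C3, C4, C5⟩ := ih (res.set t w)
        (fun t' ht' => h1 t' (List.mem_cons_of_mem _ ht'))
        (List.pairwise_cons.mp hpair).2
        (fun t' ht' => by rw [List.length_set]; exact hlen t' (List.mem_cons_of_mem _ ht'))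
      rw [hres]
      refine ⟨fun t' ht' => ⟨List.mem_cons_of_mem _ (C1 t' ht').1, (C1 t' ht').2⟩,
              ?_, C3, by rw [C4, List.length_set], ?_⟩
      · intro t' ht' hge
        rcases List.mem_cons.mp ht' with rfl | ht'
        · exact absurd hlt hge
        · exact C2 t' ht' hge
      · intro j
        rw [C5 j]
        by_cases hjt : j = t
        · subst hjt
          have hjr : j ∉ r := fun hm => absurd (htr j hm) (by omega)
          rw [if_neg (by simp [hjr]), if_pos ⟨List.mem_cons_self, hlt⟩]
          have hjl := hlen _ List.mem_cons_self
          simp [List.getD_eq_getElem?_getD, hjl]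
        · have hset : (res.set t w).getD j 0 = res.getD j 0 := by
            simp [List.getD_eq_getElem?_getD, List.getElem?_set_ne (fun h => hjt h.symm)]
          rw [hset]
          by_cases hjr : j ∈ r
          · simp [hjr]
          · rw [if_neg (by simp [hjr]), if_neg (by simp [hjr, hjt])]
    · have hres : gPop a v w res (t :: r) = (res, t :: r) := by
        rw [gPop]; rw [if_neg hlt]
      have hall : ∀ t' ∈ t :: r, ¬ a.getD t' 0 < v := by
        intro t' ht'
        rcases List.mem_cons.mp ht' with rfl | ht'
        · exact hlt
        · have htt : t' < t := (List.pairwise_cons.mp hpair).1 t' ht'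
          have htm : t < m := (h1 t List.mem_cons_self).1
          have hun : pvUnres a m t' := (h1 t' (List.mem_cons_of_mem _ ht')).2
          have := hun t htt htm
          omega
      rw [hres]
      refine ⟨fun t' ht' => ⟨ht', hall t' ht'⟩, fun t' ht' _ => ht', hpair, rfl, ?_⟩
      intro j
      rw [if_neg ?_]
      rintro ⟨hj1, hj2⟩
      exact hall j hj1 hj2

theorem pvInv_step (a : List Int) (f : Nat → Int) (m : Nat) (s : List Int × List Nat)
    (hm : m < a.length) (h : pvInv a f m s) : pvInv a f (m+1) (gStep a f s m) := by
  obtain ⟨I1, I2, I3, I4, I5⟩ := h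
  obtain ⟨C1, C2, C3, C4, C5⟩ :=
    gPop_spec a (a.getD m 0) (f m) m s.2 s.1 I1 I3
      (fun t ht => by have := (I1 t ht).1; rw [I4]; omega)
  simp only [gStep]
  refine ⟨?_, ?_, ?_, ?_, ?_⟩
  · intro t ht
    rcases List.mem_cons.mp ht with rfl | ht
    · exact ⟨by omega, fun k hk1 hk2 => by omega⟩
    · obtain ⟨hts, htv⟩ := C1 t ht
      obtain ⟨htm, htu⟩ := I1 t hts
      refine ⟨by omega, fun k hk1 hk2 => ?_⟩
      rcases Nat.lt_or_ge k m with hkm | hkm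
      · exact htu k hk1 hkm
      · have hkm' : k = m := by omega
        subst hkm'
        omega
  · intro j hj hjmem
    have hjm : j ≠ m := fun h => hjmem (h ▸ List.mem_cons_self)
    have hjlt : j < m := by omega
    by_cases hjst : j ∈ s.2
    · have hjv : a.getD j 0 < a.getD m 0 := by
        by_contra hge
        exact hjmem (List.mem_cons_of_mem _ (C2 j hjst hge))
      exact pvFirst_isSome a _ (j+1) (m+1) m (by omega) (by omega) (decide_eq_true hjv)
    · have := I2 j hjlt hjst
      obtain ⟨p, hp⟩ := Option.isSome_iff_exists.mp this
      rw [pvFirst_succ, hp]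
      rfl
  · refine List.pairwise_cons.mpr ⟨?_, C3⟩
    intro t ht
    exact (I1 t (C1 t ht).1).1
  · rw [C4]; exact I4
  · intro j hj
    rw [C5 j]
    by_cases hcond : j ∈ s.2 ∧ a.getD j 0 < a.getD m 0
    · rw [if_pos hcond]
      obtain ⟨hjst, hjv⟩ := hcond
      obtain ⟨hjm, hju⟩ := I1 j hjst
      rw [pvFirst_some_intro a _ (j+1) (m+1) m (by omega) (by omega) (decide_eq_true hjv)
          (fun k hk1 hk2 => by simp; exact hju k (by omega) hk2)]
    · rw [if_neg hcond, I5 j hj, pvFirst_succ]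
      cases hp : pvFirst a (fun y => decide (a.getD j 0 < y)) (j+1) m with
      | some p => rfl
      | none =>
        rcases Nat.lt_or_ge j m with hjm | hjm
        · have hjst : j ∈ s.2 := by
            by_contra hjst
            have := I2 j hjm hjst
            rw [hp] at this
            simp at this
          have hjv : ¬ a.getD j 0 < a.getD m 0 := fun hv => hcond ⟨hjst, hv⟩
          have hd : decide (a.getD j 0 < a.getD m 0) = false := decide_eq_false hjv
          rw [if_pos (show j + 1 ≤ m by omega), hd]
          simp
        · simp [show ¬ j + 1 ≤ m by omega]

theorem pvInv_iter (a : List Int) (f : Nat → Int) (m : Nat) (hm : m ≤ a.length) :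
    pvInv a f m (gIter a f m) := by
  induction m with
  | zero =>
    refine ⟨by simp [gIter], by simp, by simp [gIter], by simp [gIter], ?_⟩
    intro j hj
    rw [show pvFirst a (fun y => decide (a.getD j 0 < y)) (j+1) 0 = none from by
      rw [pvFirst]; rw [if_neg (by omega)]]
    simp [gIter, List.getD_eq_getElem?_getD, hj]
  | succ m ih =>
    have hgi : gIter a f (m+1) = gStep a f (gIter a f m) m := by
      unfold gIter
      rw [List.range_succ, List.foldl_append, List.foldl_cons, List.foldl_nil]
    rw [hgi]
    exact pvInv_step a f m (gIter a f m) (by omega) (ih (by omega))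

theorem gPass_spec (a : List Int) (f : Nat → Int) (j : Nat) (hj : j < a.length) :
    (gIter a f a.length).1.getD j 0 =
      match pvFirst a (fun y => a.getD j 0 < y) (j+1) a.length with
      | some p => f p | none => -1 := by
  exact (pvInv_iter a f a.length le_rfl).2.2.2.2 j hj

-- gluing: the ports' passes are instances of the generic pass
theorem popA_eq_gPop (arr : List Int) (v : Int) :
    ∀ st res, pvPopA arr v res st = gPop arr v v res st := by
  intro st
  induction st with
  | nil => intro res; rfl
  | cons t r ih =>
    intro res
    simp only [pvPopA, gPop]
    split
    · exact ih _
    · rfl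

theorem popB_eq_gPop (a : List Int) (v : Int) (i : Nat) :
    ∀ st res, pvPopB a v i res st = gPop a v (i : Int) res st := by
  intro st
  induction st with
  | nil => intro res; rfl
  | cons t r ih =>
    intro res
    simp only [pvPopB, gPop]
    split
    · exact ih _
    · rfl

theorem passA_eq (arr : List Int) :
    ((List.range arr.length).foldl (fun s i =>
      let p := pvPopA arr (arr.getD i 0) s.1 s.2
      (p.1, i :: p.2)) (List.replicate arr.length (-1), ([] : List Nat))) =
    gIter arr (fun i => arr.getD i 0) arr.length := by
  unfold gIter
  congr 1
  funext s i
  simp only [gStep]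
  rw [popA_eq_gPop]

theorem passB_eq (a : List Int) :
    pvNgeIdx a = (gIter a (fun i => (i : Int)) a.length).1 := by
  unfold pvNgeIdx gIter
  congr 2
  funext s i
  simp only [gStep]
  rw [popB_eq_gPop]

theorem searchA_spec (arr : List Int) (t : Int) (j : Nat) :
    pvSearchA arr t j = match pvFirst arr (fun y => y < t) j arr.length with
      | some q => arr.getD q 0 | none => -1 := by
  rw [pvSearchA]
  split
  · next hj =>
    conv_rhs => rw [pvFirst]
    rw [if_pos hj]
    split
    · next hlt => rw [if_pos (decide_eq_true hlt)]
    · next hge =>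
      rw [if_neg (by simpa using hge)]
      exact searchA_spec arr t (j+1)
  · next hj =>
    conv_rhs => rw [pvFirst]
    rw [if_neg hj]
  termination_by arr.length - j

theorem ngeA_getD (arr : List Int) (i : Nat) (hi : i < arr.length) :
    ((List.range arr.length).foldl (fun s i =>
      let p := pvPopA arr (arr.getD i 0) s.1 s.2
      (p.1, i :: p.2)) (List.replicate arr.length (-1), ([] : List Nat))).1.getD i 0 =
    match pvFirst arr (fun y => arr.getD i 0 < y) (i+1) arr.length with
    | some p => arr.getD p 0 | none => -1 := by
  rw [passA_eq]
  exact gPass_spec arr _ i hi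

theorem ngeB_getD (a : List Int) (i : Nat) (hi : i < a.length) :
    (pvNgeIdx a).getD i 0 =
    match pvFirst a (fun y => a.getD i 0 < y) (i+1) a.length with
    | some p => (p : Int) | none => -1 := by
  rw [passB_eq]
  exact gPass_spec a _ i hi

theorem s_getD (arr : List Int) (k : Nat) (hk : k < arr.length) :
    (pvNgeIdx (arr.map (fun x => -x))).getD k 0 =
    match pvFirst arr (fun y => y < arr.getD k 0) (k+1) arr.length with
    | some q => (q : Int) | none => -1 := by
  rw [ngeB_getD _ k (by simpa using hk)]
  rw [pvFirst_neg]
  have hq : (fun y => decide ((arr.map (fun x => -x)).getD k 0 < -y)) =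
      (fun y => decide (y < arr.getD k 0)) := by
    funext y
    rw [map_neg_getD]
    exact decide_eq_decide.mpr (by omega)
  simp only [List.length_map]
  rw [hq]

-- ===== VERDICT (by name: the statement is the Claim_ definition above) =====
theorem find_next_greater_smaller_spec : Claim_unchanged_find_next_greater_smaller := by
  intro arr _ hnd
  simp only [find_next_greater_smaller, find_next_greater_smaller_alt]
  refine List.map_congr_left ?_
  intro i hi
  have hi' : i < arr.length := List.mem_range.mp hi
  rw [ngeA_getD arr i hi', ngeB_getD arr i hi']
  cases hP : pvFirst arr (fun y => decide (arr.getD i 0 < y)) (i+1) arr.length with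
  | none => simp
  | some p =>
    obtain ⟨hp1, hp2, hp3, hp4⟩ := pvFirst_some_elim _ _ _ _ _ hP
    have hp3' : arr.getD i 0 < arr.getD p 0 := of_decide_eq_true hp3
    have hbet : ∀ k, i < k → k < p → arr.getD k 0 ≤ arr.getD i 0 := by
      intro k hk1 hk2
      have := hp4 k (by omega) hk2
      simp only [decide_eq_true_eq] at this
      omega
    rw [if_neg (show ¬((p : Int) = -1) by omega)]
    by_cases hval : arr.getD p 0 = -1
    · have hpi : p = i + 1 := by
        by_contra hne
        have hlt : i + 1 < p := by omega
        exact hnd ⟨i, hi', p, hp2, by omega, hval, hp3',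
          fun k hk2 hk1 => hbet k hk1 hk2, Or.inl hlt⟩
      have hnoj : ∀ j, p < j → j < arr.length → ¬ arr.getD j 0 < -1 := by
        intro j hj1 hj2 hjlt
        exact hnd ⟨i, hi', p, hp2, by omega, hval, hp3',
          fun k hk2 hk1 => hbet k hk1 hk2, Or.inr ⟨j, hj2, hj1, hjlt⟩⟩
      rw [if_pos hval, if_neg (show ¬((i : Int) + 1 < (p : Int)) by omega)]
      rw [Int.toNat_natCast, s_getD arr p hp2]
      rw [pvFirst_none_intro arr _ (p+1) arr.length (fun k hk1 hk2 => by
        simp only [decide_eq_true_eq]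
        rw [hval]
        exact hnoj k (by omega) hk2)]
      simp
    · rw [if_neg hval, searchA_spec]
      by_cases hpi : i + 1 < p
      · rw [if_pos (show (i : Int) + 1 < (p : Int) by omega)]
        have h1 : arr.getD (i+1) 0 < arr.getD p 0 := by
          have := hbet (i+1) (by omega) hpi
          omega
        rw [pvFirst_some_intro arr _ (i+1) arr.length (i+1) le_rfl (by omega)
          (decide_eq_true h1) (fun k hk1 hk2 => by omega)]
      · have hpeq : p = i + 1 := by omega
        subst hpeq
        rw [if_neg (show ¬((i : Int) + 1 < ((i+1 : Nat) : Int)) by omega)]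
        rw [Int.toNat_natCast, s_getD arr (i+1) hp2]
        have hstep : pvFirst arr (fun y => decide (y < arr.getD (i+1) 0)) (i+1) arr.length
            = pvFirst arr (fun y => decide (y < arr.getD (i+1) 0)) (i+2) arr.length := by
          conv_lhs => rw [pvFirst]
          rw [if_pos (by omega), if_neg (by simp)]
        rw [hstep]
        cases hQ : pvFirst arr (fun y => decide (y < arr.getD (i+1) 0)) (i+2) arr.length with
        | none => simp
        | some q' =>
          rw [if_pos (show ((q' : Int) ≠ -1) by omega)]
          rw [Int.toNat_natCast]

theorem find_next_greater_smaller_changed : Claim_changed_find_next_greater_smaller := by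
  unfold Claim_changed_find_next_greater_smaller; decide

theorem find_next_greater_smaller_tight : Claim_exact_find_next_greater_smaller := by
  intro arr _ hD heq
  obtain ⟨i, hi, p, hp, hip, hval, hlt, hbet, hdisj⟩ := hD
  have hP : pvFirst arr (fun y => decide (arr.getD i 0 < y)) (i+1) arr.length = some p :=
    pvFirst_some_intro _ _ _ _ p (by omega) hp (decide_eq_true hlt)
      (fun k hk1 hk2 => by
        simp only [decide_eq_true_eq]
        have := hbet k hk2 (by omega)
        omega)
  have hA : (find_next_greater_smaller arr)[i]? = some (-1) := by
    simp only [find_next_greater_smaller]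
    rw [List.getElem?_map, List.getElem?_range hi]
    simp only [Option.map_some]
    rw [ngeA_getD arr i hi, hP]
    rw [if_pos hval]
  have hBv : ∃ v, (find_next_greater_smaller_alt arr)[i]? = some v ∧ v ≠ -1 := by
    simp only [find_next_greater_smaller_alt]
    rw [List.getElem?_map, List.getElem?_range hi]
    simp only [Option.map_some]
    refine ⟨_, rfl, ?_⟩
    rw [ngeB_getD arr i hi, hP]
    rw [if_neg (show ¬((p : Int) = -1) by omega)]
    by_cases hpi : (i : Int) + 1 < (p : Int)
    · rw [if_pos hpi]
      have hpn : i + 1 < p := by omega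
      have := hbet (i+1) hpn (by omega)
      omega
    · rw [if_neg hpi]
      obtain ⟨j, hj, hpj, hjlt⟩ : ∃ j < arr.length, p < j ∧ arr.getD j 0 < -1 := by
        rcases hdisj with h | h
        · exact absurd h (by omega)
        · exact h
      rw [Int.toNat_natCast, s_getD arr p hp]
      have hs : (pvFirst arr (fun y => decide (y < arr.getD p 0)) (p+1) arr.length).isSome :=
        pvFirst_isSome _ _ _ _ j (by omega) hj (decide_eq_true (by rw [hval]; exact hjlt))
      obtain ⟨q', hq'⟩ := Option.isSome_iff_exists.mp hs
      obtain ⟨_, _, hq3, _⟩ := pvFirst_some_elim _ _ _ _ _ hq'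
      have hq3' : arr.getD q' 0 < arr.getD p 0 := of_decide_eq_true hq3
      rw [hq']
      rw [if_pos (show ((q' : Int) ≠ -1) by omega), Int.toNat_natCast]
      omega
  obtain ⟨v, hv, hvne⟩ := hBv
  rw [heq] at hA
  rw [hA] at hv
  exact hvne (Option.some.inj hv).symm
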